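-- pv_equiv track=rewrite | github.com/ianmoran11/meals | scripts/update-readme-with-recipes.py | categorize_recipes
-- ===== SOURCE A (Python) =====
-- def categorize_recipes(recipes):
--     """Categorize recipes based on their tags and content."""
--     categories = {
--         'Chicken & Poultry': [],
--         'Seafood': [],
--         'Meat': [],
--         'Vegetarian': [],
--         'Salads & Bowls': [],
--         'Other': []
--     }
--
--     for recipe in recipes:
--         filename, title, description, tags = recipe
--         tags_lower = [tag.lower() for tag in tags]
--
--         # Categorize based on tags and title
--         if any(tag in tags_lower for tag in ['chicken', 'poultry']):
--             categories['Chicken & Poultry'].append(recipe)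
--         elif any(tag in tags_lower for tag in ['seafood', 'fish', 'salmon', 'cod', 'shrimp', 'tuna']):
--             categories['Seafood'].append(recipe)
--         elif any(tag in tags_lower for tag in ['lamb', 'beef', 'meat']) and 'chicken' not in tags_lower:
--             categories['Meat'].append(recipe)
--         elif any(tag in tags_lower for tag in ['vegetarian', 'vegetables', 'fritters']):
--             categories['Vegetarian'].append(recipe)
--         elif any(tag in tags_lower for tag in ['salad', 'bowl']):
--             categories['Salads & Bowls'].append(recipe)
--         else:
--             # Check title for categorization
--             title_lower = title.lower() if title else ''
--             if 'chicken' in title_lower: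
--                 categories['Chicken & Poultry'].append(recipe)
--             elif any(word in title_lower for word in ['salmon', 'cod', 'shrimp', 'tuna', 'fish']):
--                 categories['Seafood'].append(recipe)
--             elif any(word in title_lower for word in ['lamb', 'beef']):
--                 categories['Meat'].append(recipe)
--             elif 'salad' in title_lower or 'bowl' in title_lower:
--                 categories['Salads & Bowls'].append(recipe)
--             elif 'vegetable' in title_lower or 'zucchini' in title_lower or 'eggplant' in title_lower:
--                 categories['Vegetarian'].append(recipe)
--             else:
--                 categories['Other'].append(recipe)
--
--     # Remove empty categories
--     return {k: v for k, v in categories.items() if v}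
-- ===== SOURCE B (Python) =====
-- # Scoring re-implementation: each keyword carries a numeric priority rank; a recipe's
-- # category is the MINIMUM rank among all matched keywords (tags first, then title
-- # substrings), and the output is built category-major by one filter pass per category.
-- TAG_RANK = {'chicken': 0, 'poultry': 0,
--             'seafood': 1, 'fish': 1, 'salmon': 1, 'cod': 1, 'shrimp': 1, 'tuna': 1,
--             'lamb': 2, 'beef': 2, 'meat': 2,
--             'vegetarian': 3, 'vegetables': 3, 'fritters': 3,
--             'salad': 4, 'bowl': 4}
-- TAG_CATS = ['Chicken & Poultry', 'Seafood', 'Meat', 'Vegetarian', 'Salads & Bowls']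
-- TITLE_RANK = [('chicken', 0),
--               ('salmon', 1), ('cod', 1), ('shrimp', 1), ('tuna', 1), ('fish', 1),
--               ('lamb', 2), ('beef', 2),
--               ('salad', 3), ('bowl', 3),
--               ('vegetable', 4), ('zucchini', 4), ('eggplant', 4)]
-- TITLE_CATS = ['Chicken & Poultry', 'Seafood', 'Meat', 'Salads & Bowls', 'Vegetarian', 'Other']
-- ORDER = ['Chicken & Poultry', 'Seafood', 'Meat', 'Vegetarian', 'Salads & Bowls', 'Other']
--
--
-- def _category(title, tags):
--     r = 5
--     for t in tags:
--         r = min(r, TAG_RANK.get(t.lower(), 5))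
--     if r < 5:
--         return TAG_CATS[r]
--     title_lower = title.lower()
--     r = 5
--     for kw, rank in TITLE_RANK:
--         if kw in title_lower:
--             r = min(r, rank)
--     return TITLE_CATS[r]
--
--
-- def categorize_recipes(recipes):
--     """Categorize recipes based on their tags and content."""
--     result = {}
--     for cat in ORDER:
--         bucket = [rec for rec in recipes if _category(rec[1], rec[3]) == cat]
--         if bucket:
--             result[cat] = bucket
--     return result
-- ===== Notes on version B (the rewrite author's own statement) =====
-- stated objective: alternative
-- what changed: Replaced A's per-recipe if/elif chain appending into a preseeded dict by a numeric priority-rank scoring scheme (category = minimum rank among matched tag/title keywords, folded with min) and a category-major construction (one filter pass per category instead of one dict-mutating pass over recipes); A's redundant 'chicken not in tags' guard on the Meat branch is dead code and dropped.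
import Mathlib
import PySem

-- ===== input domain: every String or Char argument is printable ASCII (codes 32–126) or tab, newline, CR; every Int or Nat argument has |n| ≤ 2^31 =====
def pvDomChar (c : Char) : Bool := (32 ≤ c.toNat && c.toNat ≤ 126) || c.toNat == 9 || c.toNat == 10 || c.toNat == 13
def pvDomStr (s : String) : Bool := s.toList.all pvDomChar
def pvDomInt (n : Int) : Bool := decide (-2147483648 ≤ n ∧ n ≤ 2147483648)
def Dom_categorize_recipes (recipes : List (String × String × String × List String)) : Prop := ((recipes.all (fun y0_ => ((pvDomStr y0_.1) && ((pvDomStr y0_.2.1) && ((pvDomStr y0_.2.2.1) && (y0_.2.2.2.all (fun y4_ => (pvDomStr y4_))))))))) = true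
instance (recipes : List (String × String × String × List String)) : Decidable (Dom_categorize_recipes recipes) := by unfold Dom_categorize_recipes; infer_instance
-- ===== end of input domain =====

-- B replaces A's per-recipe if/elif chain into a mutated dict by min-rank keyword scoring plus a category-major grouping (one filter per category); return-value equivalence.

-- ===== PORT A =====
-- One loop iteration of A: the nested if/elif chain, each branch appending to its category.
def aStep (d : PySem.Dict String (List (String × String × String × List String)))
    (r : String × String × String × List String) :
    PySem.Dict String (List (String × String × String × List String)) :=
  let tags_lower := r.2.2.2.map PySem.Str.lower
  if ["chicken", "poultry"].any (fun t => tags_lower.contains t) then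
    d.modify "Chicken & Poultry" [] (fun v => v ++ [r])
  else if ["seafood", "fish", "salmon", "cod", "shrimp", "tuna"].any (fun t => tags_lower.contains t) then
    d.modify "Seafood" [] (fun v => v ++ [r])
  else if ["lamb", "beef", "meat"].any (fun t => tags_lower.contains t) && !(tags_lower.contains "chicken") then
    d.modify "Meat" [] (fun v => v ++ [r])
  else if ["vegetarian", "vegetables", "fritters"].any (fun t => tags_lower.contains t) then
    d.modify "Vegetarian" [] (fun v => v ++ [r])
  else if ["salad", "bowl"].any (fun t => tags_lower.contains t) then
    d.modify "Salads & Bowls" [] (fun v => v ++ [r])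
  else
    let title_lower := if r.2.1 ≠ "" then PySem.Str.lower r.2.1 else ""
    if PySem.Str.isIn "chicken" title_lower then
      d.modify "Chicken & Poultry" [] (fun v => v ++ [r])
    else if ["salmon", "cod", "shrimp", "tuna", "fish"].any (fun w => PySem.Str.isIn w title_lower) then
      d.modify "Seafood" [] (fun v => v ++ [r])
    else if ["lamb", "beef"].any (fun w => PySem.Str.isIn w title_lower) then
      d.modify "Meat" [] (fun v => v ++ [r])
    else if PySem.Str.isIn "salad" title_lower || PySem.Str.isIn "bowl" title_lower then
      d.modify "Salads & Bowls" [] (fun v => v ++ [r])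
    else if PySem.Str.isIn "vegetable" title_lower || (PySem.Str.isIn "zucchini" title_lower || PySem.Str.isIn "eggplant" title_lower) then
      d.modify "Vegetarian" [] (fun v => v ++ [r])
    else
      d.modify "Other" [] (fun v => v ++ [r])

def categorize_recipes (recipes : List (String × String × String × List String)) : List (String × List (String × String × String × List String)) :=
  let categories : PySem.Dict String (List (String × String × String × List String)) :=
    (((((PySem.Dict.empty.insert "Chicken & Poultry" []).insert "Seafood" []).insert "Meat" []).insert
        "Vegetarian" []).insert "Salads & Bowls" []).insert "Other" []
  let categories := recipes.foldl aStep categories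
  categories.items.filter (fun kv => !kv.2.isEmpty)

-- ===== PORT B =====
-- Keyword → priority rank tables (TAG_RANK is a Python dict constant).
def pvTagRank : PySem.Dict String Nat :=
  PySem.Dict.ofList [("chicken", 0), ("poultry", 0),
    ("seafood", 1), ("fish", 1), ("salmon", 1), ("cod", 1), ("shrimp", 1), ("tuna", 1),
    ("lamb", 2), ("beef", 2), ("meat", 2),
    ("vegetarian", 3), ("vegetables", 3), ("fritters", 3),
    ("salad", 4), ("bowl", 4)]

def pvTagCats : List String :=
  ["Chicken & Poultry", "Seafood", "Meat", "Vegetarian", "Salads & Bowls"]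

def pvTitleRank : List (String × Nat) :=
  [("chicken", 0),
   ("salmon", 1), ("cod", 1), ("shrimp", 1), ("tuna", 1), ("fish", 1),
   ("lamb", 2), ("beef", 2),
   ("salad", 3), ("bowl", 3),
   ("vegetable", 4), ("zucchini", 4), ("eggplant", 4)]

def pvTitleCats : List String :=
  ["Chicken & Poultry", "Seafood", "Meat", "Salads & Bowls", "Vegetarian", "Other"]

def pvOrder : List String :=
  ["Chicken & Poultry", "Seafood", "Meat", "Vegetarian", "Salads & Bowls", "Other"]

-- _category: minimum rank among matched keywords; TAG_CATS[r]/TITLE_CATS[r] is always in range, ported via List.getD.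
def bCategory (title : String) (tags : List String) : String :=
  let r := tags.foldl (fun a t => min a (pvTagRank.getD (PySem.Str.lower t) 5)) 5
  if r < 5 then pvTagCats.getD r "Other"
  else
    let title_lower := PySem.Str.lower title
    let r2 := pvTitleRank.foldl
      (fun a kr => if PySem.Str.isIn kr.1 title_lower then min a kr.2 else a) 5
    pvTitleCats.getD r2 "Other"

def categorize_recipes_alt (recipes : List (String × String × String × List String)) : List (String × List (String × String × String × List String)) :=
  pvOrder.foldl
    (fun result cat =>
      let bucket := recipes.filter (fun rec => bCategory rec.2.1 rec.2.2.2 == cat)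
      if bucket.isEmpty then result else result ++ [(cat, bucket)])
    []

-- ===== PRECONDITION & SPEC =====
def Spec_categorize_recipes (recipes : List (String × String × String × List String)) (out : List (String × List (String × String × String × List String))) : Prop := out = categorize_recipes_alt recipes
instance (recipes : List (String × String × String × List String)) (out : List (String × List (String × String × String × List String))) : Decidable (Spec_categorize_recipes recipes out) := by unfold Spec_categorize_recipes; infer_instance

-- ===== CLAIM (what is proved, stated in full; the proofs are below) =====
def Claim_equal_categorize_recipes : Prop := ∀ (recipes : List (String × String × String × List String)), Dom_categorize_recipes recipes → Spec_categorize_recipes recipes (categorize_recipes recipes)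

-- ===== LEMMAS AND PROOFS =====

-- Keyword-group tests (one per category, in A's priority order), and A's chain as a rank.
def g0 (u : String) : Bool := u == "chicken" || u == "poultry"
def g1 (u : String) : Bool := u == "seafood" || (u == "fish" || (u == "salmon" || (u == "cod" || (u == "shrimp" || u == "tuna"))))
def g2 (u : String) : Bool := u == "lamb" || (u == "beef" || u == "meat")
def g3 (u : String) : Bool := u == "vegetarian" || (u == "vegetables" || u == "fritters")
def g4 (u : String) : Bool := u == "salad" || u == "bowl"

def rankOf (u : String) : Nat :=
  if g0 u then 0 else if g1 u then 1 else if g2 u then 2 else if g3 u then 3 else if g4 u then 4 else 5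

def mChain (tags : List String) : Nat :=
  if (tags.map PySem.Str.lower).any g0 then 0
  else if (tags.map PySem.Str.lower).any g1 then 1
  else if (tags.map PySem.Str.lower).any g2 then 2
  else if (tags.map PySem.Str.lower).any g3 then 3
  else if (tags.map PySem.Str.lower).any g4 then 4 else 5

-- A's title chain as a rank (the grouped conditions in A's title-check order).
def tRank (tl : String) : Nat :=
  if PySem.Str.isIn "chicken" tl then 0
  else if (PySem.Str.isIn "salmon" tl || (PySem.Str.isIn "cod" tl || (PySem.Str.isIn "shrimp" tl || (PySem.Str.isIn "tuna" tl || PySem.Str.isIn "fish" tl)))) then 1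
  else if (PySem.Str.isIn "lamb" tl || PySem.Str.isIn "beef" tl) then 2
  else if (PySem.Str.isIn "salad" tl || PySem.Str.isIn "bowl" tl) then 3
  else if (PySem.Str.isIn "vegetable" tl || (PySem.Str.isIn "zucchini" tl || PySem.Str.isIn "eggplant" tl)) then 4
  else 5

-- A's classifier, extracted from the chain in aStep.
def chainCat (title : String) (tags : List String) : String :=
  let tags_lower := tags.map PySem.Str.lower
  if ["chicken", "poultry"].any (fun t => tags_lower.contains t) then "Chicken & Poultry"
  else if ["seafood", "fish", "salmon", "cod", "shrimp", "tuna"].any (fun t => tags_lower.contains t) then "Seafood"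
  else if ["lamb", "beef", "meat"].any (fun t => tags_lower.contains t) && !(tags_lower.contains "chicken") then "Meat"
  else if ["vegetarian", "vegetables", "fritters"].any (fun t => tags_lower.contains t) then "Vegetarian"
  else if ["salad", "bowl"].any (fun t => tags_lower.contains t) then "Salads & Bowls"
  else
    let title_lower := if title ≠ "" then PySem.Str.lower title else ""
    if PySem.Str.isIn "chicken" title_lower then "Chicken & Poultry"
    else if ["salmon", "cod", "shrimp", "tuna", "fish"].any (fun w => PySem.Str.isIn w title_lower) then "Seafood"
    else if ["lamb", "beef"].any (fun w => PySem.Str.isIn w title_lower) then "Meat"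
    else if PySem.Str.isIn "salad" title_lower || PySem.Str.isIn "bowl" title_lower then "Salads & Bowls"
    else if PySem.Str.isIn "vegetable" title_lower || (PySem.Str.isIn "zucchini" title_lower || PySem.Str.isIn "eggplant" title_lower) then "Vegetarian"
    else "Other"

def pvInit : PySem.Dict String (List (String × String × String × List String)) :=
  (((((PySem.Dict.empty.insert "Chicken & Poultry" []).insert "Seafood" []).insert "Meat" []).insert
      "Vegetarian" []).insert "Salads & Bowls" []).insert "Other" []

theorem aStep_eq (d : PySem.Dict String (List (String × String × String × List String)))
    (r : String × String × String × List String) :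
    aStep d r = d.modify (chainCat r.2.1 r.2.2.2) [] (fun v => v ++ [r]) := by
  unfold aStep chainCat
  simp only [← apply_ite
    (fun k => d.modify k ([] : List (String × String × String × List String)) (fun v => v ++ [r]))]

theorem getD_pvTagRank (u : String) : pvTagRank.getD u 5 = rankOf u := by
  by_cases h1 : u = "chicken"
  · subst h1; decide
  by_cases h2 : u = "poultry"
  · subst h2; decide
  by_cases h3 : u = "seafood"
  · subst h3; decide
  by_cases h4 : u = "fish"
  · subst h4; decide
  by_cases h5 : u = "salmon"
  · subst h5; decide
  by_cases h6 : u = "cod"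
  · subst h6; decide
  by_cases h7 : u = "shrimp"
  · subst h7; decide
  by_cases h8 : u = "tuna"
  · subst h8; decide
  by_cases h9 : u = "lamb"
  · subst h9; decide
  by_cases h10 : u = "beef"
  · subst h10; decide
  by_cases h11 : u = "meat"
  · subst h11; decide
  by_cases h12 : u = "vegetarian"
  · subst h12; decide
  by_cases h13 : u = "vegetables"
  · subst h13; decide
  by_cases h14 : u = "fritters"
  · subst h14; decide
  by_cases h15 : u = "salad"
  · subst h15; decide
  by_cases h16 : u = "bowl"
  · subst h16; decide
  simp [pvTagRank, PySem.Dict.ofList, PySem.Dict.update, List.foldl,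
    PySem.Dict.getD_eq_get?_getD, PySem.Dict.get?_insert, PySem.Dict.get?_empty,
    rankOf, g0, g1, g2, g3, g4, h1, h2, h3, h4, h5, h6, h7, h8, h9, h10, h11, h12, h13, h14, h15, h16]


theorem boolMinChain (a0 a1 a2 a3 a4 b0 b1 b2 b3 b4 : Bool) :
    (if (a0 || b0) then (0:Nat) else if (a1 || b1) then 1 else if (a2 || b2) then 2
      else if (a3 || b3) then 3 else if (a4 || b4) then 4 else 5)
      = min (if a0 then 0 else if a1 then 1 else if a2 then 2 else if a3 then 3 else if a4 then 4 else 5)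
          (if b0 then 0 else if b1 then 1 else if b2 then 2 else if b3 then 3 else if b4 then 4 else 5) := by
  revert a0 a1 a2 a3 a4 b0 b1 b2 b3 b4; decide

theorem mChain_cons (t : String) (tags : List String) :
    mChain (t :: tags) = min (rankOf (PySem.Str.lower t)) (mChain tags) := by
  simp only [mChain, rankOf, List.map_cons, List.any_cons]
  exact boolMinChain _ _ _ _ _ _ _ _ _ _

theorem mChain_le (tags : List String) : mChain tags ≤ 5 := by
  unfold mChain; split_ifs <;> omega

theorem tagFold (tags : List String) (a : Nat) (ha : a ≤ 5) :
    tags.foldl (fun a t => min a (pvTagRank.getD (PySem.Str.lower t) 5)) a = min a (mChain tags) := by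
  induction tags generalizing a with
  | nil => simp [mChain, Nat.min_eq_left ha]
  | cons t tags ih =>
      rw [List.foldl_cons, ih _ (le_trans (Nat.min_le_left _ _) ha), getD_pvTagRank,
        mChain_cons, Nat.min_assoc]

abbrev tStep (e : Bool) (r a : Nat) : Nat := if e then min a r else a

theorem stepBool (e1 e2 e3 e4 e5 e6 e7 e8 e9 e10 e11 e12 e13 : Bool) :
    tStep e13 4 (tStep e12 4 (tStep e11 4 (tStep e10 3 (tStep e9 3 (tStep e8 2 (tStep e7 2 (tStep e6 1 (tStep e5 1 (tStep e4 1 (tStep e3 1 (tStep e2 1 (tStep e1 0 5))))))))))))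
    = (if e1 then 0 else if (e2 || (e3 || (e4 || (e5 || e6)))) then 1 else if (e7 || e8) then 2
        else if (e9 || e10) then 3 else if (e11 || (e12 || e13)) then 4 else 5) := by
  revert e1 e2 e3 e4 e5 e6 e7 e8 e9 e10 e11 e12 e13
  decide

theorem titleFold (tl : String) :
    pvTitleRank.foldl (fun a kr => if PySem.Str.isIn kr.1 tl then min a kr.2 else a) 5 = tRank tl := by
  simp only [pvTitleRank, List.foldl_cons, List.foldl_nil]
  rw [tRank]
  exact stepBool (PySem.Str.isIn "chicken" tl) (PySem.Str.isIn "salmon" tl) (PySem.Str.isIn "cod" tl)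
    (PySem.Str.isIn "shrimp" tl) (PySem.Str.isIn "tuna" tl) (PySem.Str.isIn "fish" tl)
    (PySem.Str.isIn "lamb" tl) (PySem.Str.isIn "beef" tl) (PySem.Str.isIn "salad" tl)
    (PySem.Str.isIn "bowl" tl) (PySem.Str.isIn "vegetable" tl) (PySem.Str.isIn "zucchini" tl)
    (PySem.Str.isIn "eggplant" tl)

theorem bridge0 (tl : List String) : (tl.contains "chicken" || tl.contains "poultry") = tl.any g0 := by
  rw [Bool.eq_iff_iff]
  simp only [Bool.or_eq_true, List.contains_eq_mem, List.any_eq_true, g0, decide_eq_true_eq, beq_iff_eq]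
  aesop

theorem bridge1 (tl : List String) : (tl.contains "seafood" || (tl.contains "fish" || (tl.contains "salmon" || (tl.contains "cod" || (tl.contains "shrimp" || tl.contains "tuna"))))) = tl.any g1 := by
  rw [Bool.eq_iff_iff]
  simp only [Bool.or_eq_true, List.contains_eq_mem, List.any_eq_true, g1, decide_eq_true_eq, beq_iff_eq]
  aesop

theorem bridge2 (tl : List String) : (tl.contains "lamb" || (tl.contains "beef" || tl.contains "meat")) = tl.any g2 := by
  rw [Bool.eq_iff_iff]
  simp only [Bool.or_eq_true, List.contains_eq_mem, List.any_eq_true, g2, decide_eq_true_eq, beq_iff_eq]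
  aesop

theorem bridge3 (tl : List String) : (tl.contains "vegetarian" || (tl.contains "vegetables" || tl.contains "fritters")) = tl.any g3 := by
  rw [Bool.eq_iff_iff]
  simp only [Bool.or_eq_true, List.contains_eq_mem, List.any_eq_true, g3, decide_eq_true_eq, beq_iff_eq]
  aesop

theorem bridge4 (tl : List String) : (tl.contains "salad" || tl.contains "bowl") = tl.any g4 := by
  rw [Bool.eq_iff_iff]
  simp only [Bool.or_eq_true, List.contains_eq_mem, List.any_eq_true, g4, decide_eq_true_eq, beq_iff_eq]
  aesop

theorem chicken_g0 (tl : List String) (h : tl.contains "chicken" = true) : tl.any g0 = true := by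
  simp only [List.any_eq_true]
  exact ⟨"chicken", by simpa using h, by decide⟩

theorem cat_eq (title : String) (tags : List String) :
    bCategory title tags = chainCat title tags := by
  simp only [bCategory, chainCat]
  rw [tagFold tags 5 (le_refl 5), Nat.min_eq_right (mChain_le tags), titleFold]
  simp only [List.any_cons, List.any_nil, Bool.or_false]
  rw [bridge0, bridge1, bridge2, bridge3, bridge4]
  have htl : (if title ≠ "" then PySem.Str.lower title else "") = PySem.Str.lower title := by
    by_cases h : title = ""
    · subst h; decide
    · simp [h]
  rw [htl]
  cases h0 : (tags.map PySem.Str.lower).any g0 with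
  | true => simp [mChain, h0, pvTagCats]
  | false =>
      have hck : (tags.map PySem.Str.lower).contains "chicken" = false := by
        cases h : (tags.map PySem.Str.lower).contains "chicken"
        · rfl
        · rw [chicken_g0 _ h] at h0; exact absurd h0 (by simp)
      rw [hck]
      unfold mChain tRank
      rw [h0]
      simp only [Bool.not_false, Bool.and_true, if_false, Bool.false_eq_true]
      split_ifs <;> first | rfl | omega

set_option maxHeartbeats 1000000 in
theorem cat_mem (title : String) (tags : List String) : chainCat title tags ∈ pvOrder := by
  simp only [chainCat]; split_ifs <;> decide

-- filter-of-map over keys equals B's accumulating fold.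
theorem filt_fold {α : Type} (ks : List String) (F : String → List α) (acc : List (String × List α)) :
    ks.foldl (fun res k => if (F k).isEmpty then res else res ++ [(k, F k)]) acc
      = acc ++ (ks.map (fun k => (k, F k))).filter (fun kv => !kv.2.isEmpty) := by
  induction ks generalizing acc with
  | nil => simp
  | cons k ks ih =>
      simp only [List.foldl_cons, List.map_cons, List.filter_cons]
      cases h : (F k).isEmpty
      · rw [if_neg (by simp [h]), ih, if_pos (by simp [h]), List.append_assoc]
        rfl
      · rw [if_pos (by simp [h]), ih, if_neg (by simp [h])]

-- ===== VERDICT (by name: the statement is the Claim_ definition above) =====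
theorem categorize_recipes_spec : Claim_equal_categorize_recipes := by
  intro recipes _
  unfold Spec_categorize_recipes categorize_recipes categorize_recipes_alt
  dsimp only
  rw [PySem.List.foldl_congr_mem recipes aStep
    (fun d r => d.modify (chainCat r.2.1 r.2.2.2) [] (fun v => v ++ [r])) _
    (fun d x _ => aStep_eq d x)]
  rw [show (((((PySem.Dict.empty.insert "Chicken & Poultry"
      ([] : List (String × String × String × List String))).insert "Seafood" []).insert "Meat" []).insert
      "Vegetarian" []).insert "Salads & Bowls" []).insert "Other" [] = pvInit from rfl]
  rw [filt_fold pvOrder (fun k => recipes.filter (fun rec => bCategory rec.2.1 rec.2.2.2 == k)) []]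
  have hfold : recipes.foldl (fun d r => d.modify (chainCat r.2.1 r.2.2.2) [] (fun v => v ++ [r])) pvInit
      = (recipes.map (fun r => (chainCat r.2.1 r.2.2.2, r))).foldl
          (fun d p => d.modify p.1 [] (fun v => v ++ [p.2])) pvInit :=
    (List.foldl_map (f := fun r : String × String × String × List String => (chainCat r.2.1 r.2.2.2, r))
      (g := fun (d : PySem.Dict String (List (String × String × String × List String)))
        (p : String × (String × String × String × List String)) =>
        d.modify p.1 [] fun v => v ++ [p.2])).symm
  rw [hfold]
  have hnodup : ((recipes.map (fun r => (chainCat r.2.1 r.2.2.2, r))).foldl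
      (fun d p => d.modify p.1 [] (fun v => v ++ [p.2])) pvInit).keys.Nodup :=
    PySem.Dict.nodup_keys_foldl_modify_key _ _ _ _ _ (by decide)
  have hkeys : ((recipes.map (fun r => (chainCat r.2.1 r.2.2.2, r))).foldl
      (fun d p => d.modify p.1 [] (fun v => v ++ [p.2])) pvInit).keys = pvOrder := by
    rw [PySem.Dict.keys_foldl_modify_key]
    have hinit : pvInit.keys = pvOrder := by decide
    rw [hinit, PySem.Set.update_eq_append_filter]
    have hnil : (PySem.Set.ofList ((recipes.map (fun r => (chainCat r.2.1 r.2.2.2, r))).map Prod.fst)).filter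
        (fun y => !(PySem.Set.contains pvOrder y)) = [] := by
      rw [List.filter_eq_nil_iff]
      intro a ha
      rw [PySem.Set.mem_ofList] at ha
      obtain ⟨p, hp, rfl⟩ := List.mem_map.mp ha
      obtain ⟨r, hr, rfl⟩ := List.mem_map.mp hp
      simp [cat_mem]
    rw [hnil]
    exact List.append_nil pvOrder
  rw [PySem.Dict.items_eq_map_keys _ hnodup [], hkeys]
  have hb : ∀ k : String, recipes.filter (fun rec => bCategory rec.2.1 rec.2.2.2 == k)
      = recipes.filter (fun r => chainCat r.2.1 r.2.2.2 == k) := fun k =>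
    List.filter_congr (fun r _ => by rw [cat_eq])
  simp only [hb, List.nil_append]
  apply congrArg (List.filter (fun kv : String × List (String × String × String × List String) => !kv.2.isEmpty))
  apply List.map_congr_left
  intro k hk
  rw [PySem.Dict.getD_foldl_modify_append, List.filter_map, List.map_map]
  have h1 : pvInit.getD k [] = [] := by fin_cases hk <;> decide
  rw [h1, List.nil_append]
  simp [Function.comp_def]
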